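-- pv_equiv track=rewrite | github.com/sav05102003-web/PPP_25-26_1sem | 1lab/main.py | count_rows_cols_with_many_ones
-- ===== SOURCE A (Python) =====
-- def count_rows_cols_with_many_ones(field):
--     rows = len(field)
--     cols = len(field[0])
--     rows_with_many = 0
--     cols_with_many = 0
--
--     for r in range(rows):
--         if field[r].count(1) > 3:
--             rows_with_many += 1
--
--     for c in range(cols):
--         col_ones_count = 0
--         for r in range(rows):
--             if field[r][c] == 1:
--                 col_ones_count += 1
--         if col_ones_count > 3:
--             cols_with_many += 1
--
--     return rows_with_many, cols_with_many
-- ===== SOURCE B (Python) =====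
-- def count_rows_cols_with_many_ones(field):
--     cols = len(field[0])
--     col_counts = [0] * cols
--     rows_with_many = 0
--     for row in field:
--         if row.count(1) > 3:
--             rows_with_many += 1
--         for c in range(cols):
--             if row[c] == 1:
--                 col_counts[c] += 1
--     cols_with_many = sum(1 for x in col_counts if x > 3)
--     return rows_with_many, cols_with_many
-- ===== Notes on version B (the rewrite author's own statement) =====
-- stated objective: alternative
-- what changed: Replaces A's two separate index-driven passes (a row pass plus a column-major nested scan re-reading every cell per column) by one row-major pass that counts row hits and accumulates a per-column ones table, then tallies the table.
import Mathlib
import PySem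

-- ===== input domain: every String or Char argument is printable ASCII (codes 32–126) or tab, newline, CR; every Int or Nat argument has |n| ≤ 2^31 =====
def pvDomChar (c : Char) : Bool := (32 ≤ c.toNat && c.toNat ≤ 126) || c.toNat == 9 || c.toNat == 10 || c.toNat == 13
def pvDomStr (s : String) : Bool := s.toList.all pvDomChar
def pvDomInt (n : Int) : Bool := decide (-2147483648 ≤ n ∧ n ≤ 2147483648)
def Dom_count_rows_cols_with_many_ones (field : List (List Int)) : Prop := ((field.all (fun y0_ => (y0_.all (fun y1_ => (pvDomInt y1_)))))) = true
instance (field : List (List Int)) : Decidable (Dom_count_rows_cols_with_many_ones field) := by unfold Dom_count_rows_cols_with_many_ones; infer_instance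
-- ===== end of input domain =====

-- B makes one row-major pass (row tally + per-column ones table, then a tally of the
-- table) instead of A's two index-driven passes; objective: alternative decomposition.

-- ===== PORT A =====
def count_rows_cols_with_many_ones (field : List (List Int)) : Int × Int :=
  let rows : Int := PySem.List.len field
  let cols : Int := PySem.List.len (PySem.List.pyGetD field 0 [])
  let rows_with_many : Int :=
    (PySem.List.pyRange 0 rows 1).foldl
      (fun acc r => if 3 < (PySem.List.pyGetD field r []).count 1 then acc + 1 else acc) 0
  let cols_with_many : Int :=
    (PySem.List.pyRange 0 cols 1).foldl
      (fun acc c =>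
        let col_ones_count : Int :=
          (PySem.List.pyRange 0 rows 1).foldl
            (fun cnt r => if PySem.List.pyGetD (PySem.List.pyGetD field r []) c 0 = 1 then cnt + 1 else cnt) 0
        if 3 < col_ones_count then acc + 1 else acc) 0
  (rows_with_many, cols_with_many)

-- ===== PORT B =====
-- helper: B's inner 'for c in range(cols): if row[c] == 1: col_counts[c] += 1'
def pvColStep (row : List Int) (cc : List Int) (c : Int) : List Int :=
  if PySem.List.pyGetD row c 0 = 1 then cc.set c.toNat (cc.getD c.toNat 0 + 1) else cc

def count_rows_cols_with_many_ones_alt (field : List (List Int)) : Int × Int :=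
  let cols : Int := PySem.List.len (PySem.List.pyGetD field 0 [])
  let res : Int × List Int :=
    field.foldl
      (fun st row =>
        ((if 3 < row.count 1 then st.1 + 1 else st.1),
         (PySem.List.pyRange 0 cols 1).foldl (pvColStep row) st.2))
      (0, List.replicate cols.toNat 0)
  (res.1, (res.2.countP (fun x => 3 < x) : Int))

-- ===== PRECONDITION & SPEC =====
-- Pre_ excludes exactly the inputs where Python A raises IndexError: the empty list
-- (field[0]) and jagged inputs with a row shorter than the first row (field[r][c]).
def Pre_count_rows_cols_with_many_ones (field : List (List Int)) : Prop :=
  field ≠ [] ∧ ∀ row ∈ field, (field.headD []).length ≤ row.length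
instance (field : List (List Int)) : Decidable (Pre_count_rows_cols_with_many_ones field) := by unfold Pre_count_rows_cols_with_many_ones; infer_instance

def pvWitness_count_rows_cols_with_many_ones : List (List Int) :=
  [[1, 1, 1, 1], [1, 0, 1, 1], [1, 1, 0, 1], [1, 1, 1, 0], [0, 1, 1, 1]]

def Spec_count_rows_cols_with_many_ones (field : List (List Int)) (out : Int × Int) : Prop := out = count_rows_cols_with_many_ones_alt field
instance (field : List (List Int)) (out : Int × Int) : Decidable (Spec_count_rows_cols_with_many_ones field out) := by unfold Spec_count_rows_cols_with_many_ones; infer_instance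

-- ===== CLAIM (what is proved, stated in full; the proofs are below) =====
def Claim_equal_count_rows_cols_with_many_ones : Prop := ∀ (field : List (List Int)), Dom_count_rows_cols_with_many_ones field → Pre_count_rows_cols_with_many_ones field → Spec_count_rows_cols_with_many_ones field (count_rows_cols_with_many_ones field)

-- ===== LEMMAS AND PROOFS =====

-- the per-column ones count A computes for column c
def pvColCnt (field : List (List Int)) (c : Int) : Int :=
  (field.countP (fun row => decide (PySem.List.pyGetD row c 0 = 1)) : Int)

theorem pvColStep_length (row : List Int) (cs : List Int) : ∀ (cc : List Int),
    (cs.foldl (pvColStep row) cc).length = cc.length := by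
  induction cs with
  | nil => intro cc; rfl
  | cons c cs ih =>
    intro cc
    simp only [List.foldl_cons, ih, pvColStep]
    split_ifs <;> simp


theorem pvCondIff (row : List Int) (m k : Nat) (hk : k ≠ m) :
    (k < m ∧ PySem.List.pyGetD row (k : Int) 0 = 1) ↔
      (k < m + 1 ∧ PySem.List.pyGetD row (k : Int) 0 = 1) := by
  constructor
  · rintro ⟨h1, h2⟩; exact ⟨Nat.lt_succ_of_lt h1, h2⟩
  · rintro ⟨h1, h2⟩; exact ⟨by omega, h2⟩

theorem pvColCnt_cons (row : List Int) (rest : List (List Int)) (c : Int) :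
    pvColCnt (row :: rest) c =
      (if PySem.List.pyGetD row c 0 = 1 then 1 else 0) + pvColCnt rest c := by
  unfold pvColCnt
  rw [List.countP_cons]
  push_cast
  by_cases hp : PySem.List.pyGetD row c 0 = 1
  · rw [if_pos hp, if_pos (by simp [hp])]; ring
  · rw [if_neg hp, if_neg (by simp [hp])]; ring

-- characterization of one row's column-table update over range(m)
theorem pvInner_getElem? (row : List Int) : ∀ (m : Nat) (cc : List Int) (k : Nat),
    ((PySem.List.pyRange 0 (m : Int) 1).foldl (pvColStep row) cc)[k]? =
      if k < m ∧ PySem.List.pyGetD row (k : Int) 0 = 1 then cc[k]?.map (· + 1) else cc[k]? := by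
  intro m
  induction m with
  | zero =>
    intro cc k
    rw [show ((0 : Nat) : Int) = 0 from rfl, PySem.List.pyRange_one_eq_nil le_rfl, List.foldl_nil,
        if_neg (fun h => absurd h.1 (Nat.not_lt_zero k))]
  | succ m ih =>
    intro cc k
    have h : ((m : Int) + 1) = ((m + 1 : Nat) : Int) := by push_cast; ring
    rw [← h, PySem.List.pyRange_one_succ_right (Int.natCast_nonneg m), List.foldl_append]
    simp only [List.foldl_cons, List.foldl_nil, pvColStep, Int.toNat_natCast]
    by_cases hp : PySem.List.pyGetD row (m : Int) 0 = 1
    · rw [if_pos hp]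
      have hm : ((PySem.List.pyRange 0 (m : Int) 1).foldl (pvColStep row) cc)[m]? = cc[m]? := by
        rw [ih cc m, if_neg (fun hh => absurd hh.1 (lt_irrefl m))]
      by_cases hk : k = m
      · subst hk
        rw [List.getElem?_set, if_pos rfl, pvColStep_length]
        rw [List.getD_eq_getElem?_getD, hm]
        by_cases hl : k < cc.length
        · rw [if_pos hl, if_pos ⟨Nat.lt_succ_self k, hp⟩]
          obtain ⟨v, hv⟩ : ∃ v, cc[k]? = some v := ⟨cc[k], List.getElem?_eq_getElem hl⟩
          simp [hv]
        · rw [if_neg hl, if_pos ⟨Nat.lt_succ_self k, hp⟩,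
              List.getElem?_eq_none (by omega)]
          rfl
      · rw [List.getElem?_set, if_neg (fun hh => hk hh.symm), ih cc k,
            if_congr (pvCondIff row m k hk) rfl rfl]
    · rw [if_neg hp, ih cc k]
      by_cases hk : k = m
      · subst hk
        rw [if_neg (fun hh => absurd hh.1 (lt_irrefl k)), if_neg (fun hh => hp hh.2)]
      · rw [if_congr (pvCondIff row m k hk) rfl rfl]

-- characterization of the whole column table built by B's row pass
theorem pvOuter_getElem? (m : Nat) (rows : List (List Int)) : ∀ (cc : List Int) (k : Nat),
    (rows.foldl (fun st row => (PySem.List.pyRange 0 (m : Int) 1).foldl (pvColStep row) st) cc)[k]? =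
      if k < m then cc[k]?.map (· + pvColCnt rows (k : Int)) else cc[k]? := by
  induction rows with
  | nil =>
    intro cc k
    simp only [List.foldl_nil, pvColCnt, List.countP_nil, Nat.cast_zero]
    split_ifs
    · cases cc[k]? <;> simp
    · rfl
  | cons row rest ih =>
    intro cc k
    simp only [List.foldl_cons]
    rw [ih, pvInner_getElem? row m cc k, pvColCnt_cons]
    by_cases hk : k < m
    · rw [if_pos hk, if_pos hk]
      by_cases hp : PySem.List.pyGetD row (k : Int) 0 = 1
      · rw [if_pos ⟨hk, hp⟩, if_pos hp, Option.map_map]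
        cases cc[k]? with
        | none => rfl
        | some v => simp only [Option.map_some, Function.comp]; rw [Option.some.injEq]; ring
      · rw [if_neg (fun hh => hp hh.2), if_neg hp]
        cases cc[k]? with
        | none => rfl
        | some v => simp only [Option.map_some]; rw [Option.some.injEq]; ring
    · rw [if_neg hk, if_neg hk, if_neg (fun hh => hk hh.1)]

theorem pvTable_eq (field : List (List Int)) (m : Nat) :
    field.foldl (fun st row => (PySem.List.pyRange 0 (m : Int) 1).foldl (pvColStep row) st)
        (List.replicate m 0) =
      (PySem.List.pyRange 0 (m : Int) 1).map (pvColCnt field) := by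
  apply List.ext_getElem?
  intro k
  rw [pvOuter_getElem?]
  by_cases hk : k < m
  · rw [if_pos hk, PySem.List.getElem?_map_pyRange_zero _ _ _ hk,
        List.getElem?_replicate, if_pos hk]
    simp
  · rw [if_neg hk, List.getElem?_replicate, if_neg hk,
        List.getElem?_eq_none
          (le_trans (le_of_eq (by rw [List.length_map, PySem.List.length_pyRange_one]; omega))
            (Nat.le_of_not_lt hk))]

-- ===== VERDICT (by name: the statement is the Claim_ definition above) =====
theorem count_rows_cols_with_many_ones_spec : Claim_equal_count_rows_cols_with_many_ones := by
  intro field _ _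
  unfold Spec_count_rows_cols_with_many_ones
  simp only [count_rows_cols_with_many_ones, count_rows_cols_with_many_ones_alt,
    PySem.List.len_eq, Int.toNat_natCast]
  set m : Nat := (PySem.List.pyGetD field 0 []).length
  rw [PySem.List.foldl_prod_mk
        (f := fun (a : Int) (row : List Int) => if 3 < row.count 1 then a + 1 else a)
        (g := fun (b : List Int) (row : List Int) =>
          (PySem.List.pyRange 0 (m : Int) 1).foldl (pvColStep row) b)]
  rw [PySem.List.foldl_pyRange_zero_pyGetD' field []
        (f := fun (acc : Int) (row : List Int) => if 3 < row.count 1 then acc + 1 else acc)]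
  have hcol : ∀ c : Int,
      (PySem.List.pyRange 0 ((field.length : Int)) 1).foldl
        (fun cnt r => if PySem.List.pyGetD (PySem.List.pyGetD field r []) c 0 = 1 then cnt + 1 else cnt)
        (0 : Int) = pvColCnt field c := by
    intro c
    rw [PySem.List.foldl_pyRange_zero_pyGetD' field []
          (f := fun (cnt : Int) (row : List Int) =>
            if PySem.List.pyGetD row c 0 = 1 then cnt + 1 else cnt),
        PySem.List.foldl_ite_add_one]
    simp [pvColCnt]
  rw [Prod.mk.injEq]
  refine ⟨rfl, ?_⟩
  simp only [hcol]
  rw [pvTable_eq field m, List.countP_map,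
      PySem.List.foldl_ite_add_one (p := fun c : Int => 3 < pvColCnt field c)]
  rw [zero_add]
  rfl
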